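-- pv_equiv track=rewrite | github.com/22eming/sawol | Level3_숫자게임.py | solution
-- ===== SOURCE A (Python) =====
-- import bisect
--
-- def solution(A, B):
--     answer = 0
--     B_rank = {}
--     for i in B: # B의 숫자 보유현황
--         if B_rank.get(i) == None:
--             B_rank[i] = 1
--         else:
--             B_rank[i] += 1
--
--     rank = sorted(B_rank.keys())
--
--     for i in A:
--         index = bisect.bisect_right(rank, i)    # 승리 할 수 있는 최소값 인덱스
--         if index == len(rank):  # 이길 수 없을때
--             continue
--         else:
--             B_rank[rank[index]] -= 1
--             answer += 1
--             if B_rank[rank[index]] == 0: # 숫자를 다 사용하면 지우기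
--                 del rank[index]
--
--     return answer
-- ===== SOURCE B (Python) =====
-- def solution(A, B):
--     sa = sorted(A)
--     sb = sorted(B)
--     j = 0
--     answer = 0
--     for a in sa:
--         while j < len(sb) and sb[j] <= a:
--             j += 1
--         if j < len(sb):
--             answer += 1
--             j += 1
--     return answer
-- ===== Notes on version B (the rewrite author's own statement) =====
-- stated objective: faster
-- what changed: Replaced the per-element bisect over a shrinking key list backed by a count dict (list deletion is O(n)) with sort-both-then-two-pointer greedy: one monotone index sweep over sorted B while scanning sorted A.
import Mathlib
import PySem

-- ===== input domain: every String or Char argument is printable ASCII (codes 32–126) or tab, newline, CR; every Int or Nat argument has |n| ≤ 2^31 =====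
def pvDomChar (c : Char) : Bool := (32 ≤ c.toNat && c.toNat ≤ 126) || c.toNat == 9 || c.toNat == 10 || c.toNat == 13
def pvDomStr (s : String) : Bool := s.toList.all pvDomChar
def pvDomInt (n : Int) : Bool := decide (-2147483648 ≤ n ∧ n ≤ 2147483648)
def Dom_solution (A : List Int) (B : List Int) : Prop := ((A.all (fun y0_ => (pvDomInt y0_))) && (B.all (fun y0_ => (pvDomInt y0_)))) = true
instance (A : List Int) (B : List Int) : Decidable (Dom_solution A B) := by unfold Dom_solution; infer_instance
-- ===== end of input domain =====

-- B replaces A's bisect-over-a-shrinking-key-list greedy by sort-both-then-two-pointer (measured faster in a timing run).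

-- ===== PORT A =====
-- one step of A's main loop over i ∈ A; state = (answer, B_rank, rank)
def solAStep (st : Int × PySem.Dict Int Int × List Int) (i : Int) : Int × PySem.Dict Int Int × List Int :=
  let answer := st.1
  let d := st.2.1
  let rank := st.2.2
  let index := PySem.List.bisectRight rank i
  if index = rank.length then (answer, d, rank)
  else
    let k := rank.getD index 0            -- rank[index]; index < len rank here, so getD is exact
    let d := d.insert k (d.getD k 0 - 1)  -- B_rank[rank[index]] -= 1 (the key is present)
    let answer := answer + 1
    if d.getD k 0 = 0 then (answer, d, rank.eraseIdx index) else (answer, d, rank)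

def solution (A : List Int) (B : List Int) : Int :=
  -- first loop: B_rank counts each i ∈ B
  let d0 : PySem.Dict Int Int :=
    B.foldl (fun d i => if (d.get? i).isNone then d.insert i 1 else d.insert i (d.getD i 0 + 1))
      PySem.Dict.empty
  let rank0 := PySem.List.sorted d0.keys (fun x => x)
  (A.foldl solAStep (0, d0, rank0)).1

-- ===== PORT B =====
-- the inner `while j < len(sb) and sb[j] <= a: j += 1`
def tpBump (sb : List Int) (a : Int) (j : Nat) : Nat :=
  if h : j < sb.length then (if sb[j] ≤ a then tpBump sb a (j + 1) else j) else j
  termination_by sb.length - j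

def solution_alt (A : List Int) (B : List Int) : Int :=
  let sa := PySem.List.sorted A (fun x => x)
  let sb := PySem.List.sorted B (fun x => x)
  (sa.foldl (fun (st : Nat × Int) a =>
      let j := tpBump sb a st.1
      if j < sb.length then (j + 1, st.2 + 1) else (j, st.2)) (0, 0)).2

-- ===== PRECONDITION & SPEC =====
def Spec_solution (A : List Int) (B : List Int) (out : Int) : Prop := out = solution_alt A B
instance (A : List Int) (B : List Int) (out : Int) : Decidable (Spec_solution A B out) := by unfold Spec_solution; infer_instance

-- ===== CLAIM (what is proved, stated in full; the proofs are below) =====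
def Claim_equal_solution : Prop := ∀ (A : List Int) (B : List Int), Dom_solution A B → Spec_solution A B (solution A B)

-- ===== LEMMAS AND PROOFS =====

-- abstract greedy step: remove the first remaining element strictly greater than a
def pick (a : Int) : List Int → Option (List Int)
  | [] => none
  | x :: t => if a < x then some t else (pick a t).map (x :: ·)

def gstep (a : Int) (p : List Int × Int) : List Int × Int :=
  match pick a p.1 with
  | none => p
  | some s => (s, p.2 + 1)

-- the multiset that A's (count dict, key list) state denotes
def expand (d : PySem.Dict Int Int) : List Int → List Int
  | [] => []
  | k :: r => List.replicate (d.getD k 0).toNat k ++ expand d r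

def InvA (d : PySem.Dict Int Int) (r : List Int) : Prop :=
  r.Pairwise (· < ·) ∧ ∀ k ∈ r, 1 ≤ d.getD k 0

-- abstract form of B's loop body (acting on the remaining suffix of sb)
def tstep (a : Int) (p : List Int × Int) : List Int × Int :=
  let r := p.1.dropWhile (fun x => decide (x ≤ a))
  if r = [] then (r, p.2) else (r.tail, p.2 + 1)

theorem pick_none_iff (a : Int) (s : List Int) : pick a s = none ↔ ∀ x ∈ s, x ≤ a := by
  induction s with
  | nil => simp [pick]
  | cons x t ih =>
    simp only [pick]
    by_cases h : a < x
    · simp only [if_pos h]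
      constructor
      · intro hc; cases hc
      · intro hall
        have := hall x (by simp)
        omega
    · simp only [if_neg h]
      constructor
      · intro hn
        rcases Option.map_eq_none_iff.mp hn with hn
        intro y hy
        rcases List.mem_cons.mp hy with rfl | hy
        · omega
        · exact (ih.mp hn) y hy
      · intro hall
        rw [Option.map_eq_none_iff]
        exact ih.mpr (fun y hy => hall y (by simp [hy]))

theorem pick_sublist (a : Int) : ∀ {s s' : List Int}, pick a s = some s' → s'.Sublist s := by
  intro s
  induction s with
  | nil => intro s' h; simp [pick] at h
  | cons x t ih =>
    intro s' h
    simp only [pick] at h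
    by_cases hx : a < x
    · simp [hx] at h; subst h; exact List.sublist_cons_self x t
    · simp [hx] at h
      obtain ⟨u, hu, rfl⟩ := h
      exact (ih hu).cons₂ x

theorem pick_append_le (a : Int) (junk : List Int) (s : List Int) (hj : ∀ x ∈ junk, x ≤ a) :
    pick a (junk ++ s) = (pick a s).map (junk ++ ·) := by
  induction junk with
  | nil => simp
  | cons x t ih =>
    have hx : ¬ a < x := by have := hj x (by simp); omega
    simp only [List.cons_append, pick, if_neg hx, ih (fun y hy => hj y (by simp [hy]))]
    cases pick a s <;> simp

theorem pick_dropWhile (a : Int) (s : List Int) :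
    pick a s = if s.dropWhile (fun x => decide (x ≤ a)) = [] then none
      else some (s.takeWhile (fun x => decide (x ≤ a)) ++ (s.dropWhile (fun x => decide (x ≤ a))).tail) := by
  induction s with
  | nil => simp [pick]
  | cons x t ih =>
    by_cases h : a < x
    · have hx : ¬ (x ≤ a) := by omega
      simp [pick, h, List.dropWhile, List.takeWhile, hx]
    · have hx : x ≤ a := by omega
      simp only [pick, if_neg h, List.dropWhile, List.takeWhile, decide_eq_true hx, ih]
      by_cases he : t.dropWhile (fun x => decide (x ≤ a)) = [] <;> simp [he]

theorem gstep_cons {x a : Int} (h : x ≤ a) (u : List Int) (c : Int) :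
    gstep a (x :: u, c) = ((gstep a (u, c)).1.cons x, (gstep a (u, c)).2) := by
  have hx : ¬ a < x := by omega
  simp only [gstep, pick, if_neg hx]
  cases hp : pick a u <;> simp [hp]

theorem gstep_comm_le {a b : Int} (hab : a ≤ b) (s : List Int) (hs : s.Pairwise (· ≤ ·)) (c : Int) :
    gstep a (gstep b (s, c)) = gstep b (gstep a (s, c)) := by
  induction s generalizing c with
  | nil => simp [gstep, pick]
  | cons x t ih =>
    have ht : t.Pairwise (· ≤ ·) := hs.tail
    have hxt : ∀ y ∈ t, x ≤ y := fun y hy => List.rel_of_pairwise_cons hs hy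
    by_cases hbx : b < x
    · have hax : a < x := by omega
      -- both picks take x
      simp only [gstep, pick, if_pos hbx, if_pos hax]
      cases t with
      | nil => simp [pick]
      | cons y u =>
        have hay : a < y := by have := hxt y (by simp); omega
        have hby : b < y := by have := hxt y (by simp); omega
        simp [pick, hay, hby]
    · by_cases hax : a < x
      · -- a takes x, b descends into t
        have hxb : x ≤ b := by omega
        simp only [gstep, pick, if_pos hax, if_neg hbx]
        cases hp : pick b t with
        | none => simp [gstep, pick, hp, if_pos hax]
        | some t2 => simp [gstep, pick, hp, if_pos hax]
      · -- both descend
        have hxa : x ≤ a := by omega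
        have hxb : x ≤ b := by omega
        rw [gstep_cons hxb t c, show ((gstep b (t,c)).1.cons x, (gstep b (t,c)).2)
              = (x :: (gstep b (t,c)).1, (gstep b (t,c)).2) from rfl]
        rw [show (x :: (gstep b (t,c)).1, (gstep b (t,c)).2)
              = ((x : Int) :: (gstep b (t,c)).1, (gstep b (t,c)).2) from rfl]
        rw [show ((x : Int) :: (gstep b (t,c)).1, (gstep b (t,c)).2)
              = (((gstep b (t,c)).1).cons x, (gstep b (t,c)).2) from rfl]
        have e1 : gstep a (((gstep b (t,c)).1).cons x, (gstep b (t,c)).2)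
            = ((gstep a (gstep b (t,c))).1.cons x, (gstep a (gstep b (t,c))).2) := by
          have := gstep_cons hxa (gstep b (t,c)).1 (gstep b (t,c)).2
          simpa using this
        rw [e1]
        rw [gstep_cons hxa t c]
        have e2 : gstep b (((gstep a (t,c)).1).cons x, (gstep a (t,c)).2)
            = ((gstep b (gstep a (t,c))).1.cons x, (gstep b (gstep a (t,c))).2) := by
          have := gstep_cons hxb (gstep a (t,c)).1 (gstep a (t,c)).2
          simpa using this
        rw [e2, ih ht c]

theorem gstep_pairwise {a : Int} {p : List Int × Int} (h : p.1.Pairwise (· ≤ ·)) :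
    (gstep a p).1.Pairwise (· ≤ ·) := by
  unfold gstep
  cases hp : pick a p.1 with
  | none => simpa
  | some s => exact h.sublist (pick_sublist a hp)

theorem gstep_comm (a b : Int) (s : List Int) (hs : s.Pairwise (· ≤ ·)) (c : Int) :
    gstep a (gstep b (s, c)) = gstep b (gstep a (s, c)) := by
  rcases le_total a b with h | h
  · exact gstep_comm_le h s hs c
  · exact (gstep_comm_le h s hs c).symm

theorem foldl_gstep_perm {l l' : List Int} (h : l.Perm l') :
    ∀ p : List Int × Int, p.1.Pairwise (· ≤ ·) →
      l.foldl (fun p a => gstep a p) p = l'.foldl (fun p a => gstep a p) p := by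
  induction h with
  | nil => intro p hp; rfl
  | cons a h ih =>
    intro p hp
    simp only [List.foldl_cons]
    exact ih (gstep a p) (gstep_pairwise hp)
  | swap a b l =>
    intro p hp
    simp only [List.foldl_cons]
    rw [show gstep a (gstep b p) = gstep b (gstep a p) from by
      obtain ⟨s, c⟩ := p; exact gstep_comm a b s hp c]
  | trans h1 h2 ih1 ih2 =>
    intro p hp
    rw [ih1 p hp, ih2 p hp]

theorem tpBump_drop (sb : List Int) (a : Int) (j : Nat) :
    sb.drop (tpBump sb a j) = (sb.drop j).dropWhile (fun x => decide (x ≤ a)) := by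
  fun_induction tpBump sb a j with
  | case1 j h hle ih =>
    rw [ih, List.drop_eq_getElem_cons h, List.dropWhile_cons]
    simp [hle]
  | case2 j h hle =>
    conv_rhs => rw [List.drop_eq_getElem_cons h, List.dropWhile_cons]
    simp only [hle, decide_false, Bool.false_eq_true, if_false]
    exact List.drop_eq_getElem_cons h
  | case3 j h =>
    have : sb.drop j = [] := List.drop_eq_nil_of_le (by omega)
    simp [this]

theorem tpBump_le (sb : List Int) (a : Int) (j : Nat) (h : j ≤ sb.length) :
    tpBump sb a j ≤ sb.length := by
  fun_induction tpBump sb a j with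
  | case1 j h hle ih => exact ih (by omega)
  | case2 j h hle => omega
  | case3 j h => omega

theorem loopB_bridge (sb : List Int) (L : List Int) :
    ∀ (j : Nat) (c : Int), j ≤ sb.length →
      (L.foldl (fun (st : Nat × Int) a =>
          let j := tpBump sb a st.1
          if j < sb.length then (j + 1, st.2 + 1) else (j, st.2)) (j, c)).2
        = (L.foldl (fun p a => tstep a p) (sb.drop j, c)).2 := by
  induction L with
  | nil => intro j c h; rfl
  | cons a L ih =>
    intro j c h
    simp only [List.foldl_cons]
    have hb := tpBump_le sb a j h
    have hd := tpBump_drop sb a j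
    by_cases hlt : tpBump sb a j < sb.length
    · have hne : sb.drop (tpBump sb a j) ≠ [] := by
        simp [List.drop_eq_nil_iff]; omega
      rw [if_pos hlt]
      have : tstep a (sb.drop j, c) = ((sb.drop (tpBump sb a j)).tail, c + 1) := by
        simp only [tstep, ← hd, if_neg hne]
      rw [this, ih _ _ (by omega), ← List.drop_drop]
      simp [Nat.add_comm]
    · have heq : sb.drop (tpBump sb a j) = [] := List.drop_eq_nil_of_le (by omega)
      rw [if_neg hlt]
      have : tstep a (sb.drop j, c) = ([], c) := by
        simp [tstep, ← hd, heq]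
      rw [this, ih _ _ (by omega), heq]

theorem greedy_eq_tfold (L : List Int) :
    ∀ (junk r : List Int) (c : Int), (∀ x ∈ junk, ∀ a ∈ L, x ≤ a) → L.Pairwise (· ≤ ·) →
      (L.foldl (fun p a => gstep a p) (junk ++ r, c)).2 = (L.foldl (fun p a => tstep a p) (r, c)).2 := by
  induction L with
  | nil => intro junk r c hj hL; rfl
  | cons a L ih =>
    intro junk r c hj hL
    have hja : ∀ x ∈ junk, x ≤ a := fun x hx => hj x hx a (by simp)
    have haL : ∀ b ∈ L, a ≤ b := fun b hb => List.rel_of_pairwise_cons hL hb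
    simp only [List.foldl_cons]
    have hg : gstep a (junk ++ r, c) = match pick a r with
        | none => (junk ++ r, c)
        | some s => (junk ++ s, c + 1) := by
      simp only [gstep, pick_append_le a junk r hja]
      cases pick a r <;> simp
    rw [pick_dropWhile] at hg
    by_cases he : r.dropWhile (fun x => decide (x ≤ a)) = []
    · rw [he] at hg
      simp only [if_pos rfl] at hg
      simp at hg
      have hrle : ∀ x ∈ r, x ≤ a := by
        intro x hx
        by_contra hgt
        have : (fun x => decide (x ≤ a)) x = true → False := by simp; omega
        have := List.dropWhile_eq_nil_iff.mp he  -- ∀ elements satisfy pred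
        simp at this
        exact hgt (this x hx)
      rw [hg]
      have htst : tstep a (r, c) = ([], c) := by simp [tstep, he]
      rw [htst]
      have := ih (junk ++ r) [] c (by
        intro x hx b hb
        rcases List.mem_append.mp hx with hx | hx
        · exact hj x hx b (by simp [hb])
        · exact le_trans (hrle x hx) (haL b hb)) hL.tail
      simpa using this
    · simp only [he, if_neg he] at hg
      rw [hg]
      have htst : tstep a (r, c) = ((r.dropWhile (fun x => decide (x ≤ a))).tail, c + 1) := by
        simp only [tstep, if_neg he]
      rw [htst]
      have := ih (junk ++ r.takeWhile (fun x => decide (x ≤ a)))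
        ((r.dropWhile (fun x => decide (x ≤ a))).tail) (c+1) (by
        intro x hx b hb
        rcases List.mem_append.mp hx with hx | hx
        · exact hj x hx b (by simp [hb])
        · have hxa : x ≤ a := by
            have := List.mem_takeWhile_imp hx
            simpa using this
          exact le_trans hxa (haL b hb)) hL.tail
      simpa using this

theorem counterFold_eq (B : List Int) :
    B.foldl (fun d i => if (d.get? i).isNone then d.insert i 1 else d.insert i (d.getD i 0 + 1))
      PySem.Dict.empty = PySem.Dict.counter B := by
  rw [← PySem.Dict.foldl_insert_getD_add_one_eq_counter]
  suffices h : ∀ d : PySem.Dict Int Int,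
      B.foldl (fun d i => if (d.get? i).isNone then d.insert i 1 else d.insert i (d.getD i 0 + 1)) d
        = B.foldl (fun d i => d.insert i (d.getD i 0 + 1)) d from h _
  induction B with
  | nil => intro d; rfl
  | cons i B ih =>
    intro d
    simp only [List.foldl_cons]
    rw [show (if (d.get? i).isNone then d.insert i 1 else d.insert i (d.getD i 0 + 1))
          = d.insert i (d.getD i 0 + 1) from ?_, ih]
    cases hg : d.get? i with
    | none => simp [PySem.Dict.getD_of_get?_eq_none d 0 hg]
    | some v => simp [hg]

theorem expand_append (d : PySem.Dict Int Int) (r1 r2 : List Int) :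
    expand d (r1 ++ r2) = expand d r1 ++ expand d r2 := by
  induction r1 with
  | nil => rfl
  | cons k r ih => simp [expand, ih]

theorem mem_expand {d : PySem.Dict Int Int} {r : List Int} {x : Int} (h : x ∈ expand d r) : x ∈ r := by
  induction r with
  | nil => simp [expand] at h
  | cons k r ih =>
    simp only [expand, List.mem_append] at h
    rcases h with h | h
    · simp [List.eq_of_mem_replicate h]
    · simp [ih h]

theorem expand_insert_of_not_mem {d : PySem.Dict Int Int} {r : List Int} {k : Int} (v : Int)
    (h : k ∉ r) : expand (d.insert k v) r = expand d r := by
  induction r with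
  | nil => rfl
  | cons k' r ih =>
    have hne : k' ≠ k := by rintro rfl; simp at h
    simp only [expand, PySem.Dict.getD_insert_of_ne d v 0 hne,
      ih (fun hm => h (by simp [hm]))]

theorem solAStep_sim (i : Int) (ans : Int) (d : PySem.Dict Int Int) (r : List Int) (h : InvA d r) :
    (expand (solAStep (ans, d, r) i).2.1 (solAStep (ans, d, r) i).2.2, (solAStep (ans, d, r) i).1)
      = gstep i (expand d r, ans) ∧ InvA (solAStep (ans, d, r) i).2.1 (solAStep (ans, d, r) i).2.2 := by
  obtain ⟨hpw, hcnt⟩ := h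
  obtain ⟨hle, hlt, hgt⟩ := PySem.List.bisectRight_spec r i (hpw.imp (fun h => le_of_lt h))
  set idx := PySem.List.bisectRight r i with hidxdef
  by_cases hidx : idx = r.length
  · -- continue branch: nothing beats i
    have hpick : pick i (expand d r) = none := by
      rw [pick_none_iff]
      intro x hx
      obtain ⟨j, hj, rfl⟩ := List.mem_iff_getElem.mp (mem_expand hx)
      exact hlt j hj (by omega)
    have hstep0 : solAStep (ans, d, r) i = (ans, d, r) := by
      simp only [solAStep, ← hidxdef, if_pos hidx]
    rw [hstep0]
    refine ⟨by simp [gstep, hpick], hpw, hcnt⟩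
  · have hidx' : idx < r.length := by omega
    have hk : r.getD idx 0 = r[idx] := by
      rw [List.getD_eq_getElem?_getD, List.getElem?_eq_getElem hidx']; rfl
    set k := r[idx] with hkdef
    have hkmem : k ∈ r := List.getElem_mem hidx'
    have hc1 : 1 ≤ d.getD k 0 := hcnt k hkmem
    set c := d.getD k 0 with hcdef
    -- strictness facts
    have hstrict : ∀ p q (hp : p < r.length) (hq : q < r.length), p < q → r[p] < r[q] :=
      fun p q hp hq hpq => List.pairwise_iff_getElem.mp hpw p q hp hq hpq
    have hknotin_take : k ∉ r.take idx := by
      intro hm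
      obtain ⟨j, hj, hjv⟩ := List.mem_iff_getElem.mp hm
      rw [List.getElem_take] at hjv
      have hjlt : j < idx := lt_of_lt_of_le hj (List.length_take_le _ _)
      have := hstrict j idx (by omega) hidx' (by omega)
      omega
    have hknotin_drop : k ∉ r.drop (idx + 1) := by
      intro hm
      obtain ⟨j, hj, hjv⟩ := List.mem_iff_getElem.mp hm
      rw [List.getElem_drop] at hjv
      have := hstrict idx (idx + 1 + j) hidx' (by simp at hj; omega) (by omega)
      omega
    -- decomposition and the pick computation
    have hdecomp : r = r.take idx ++ k :: r.drop (idx + 1) := by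
      conv_lhs => rw [← List.take_append_drop idx r]
      rw [List.drop_eq_getElem_cons hidx']
    have htake_le : ∀ x ∈ expand d (r.take idx), x ≤ i := by
      intro x hx
      obtain ⟨j, hj, hjv⟩ := List.mem_iff_getElem.mp (mem_expand hx)
      rw [List.getElem_take] at hjv
      have hjlt : j < idx := lt_of_lt_of_le hj (List.length_take_le _ _)
      subst hjv
      exact hlt j (by omega) hjlt
    have hik : i < k := hgt idx hidx' (le_refl _)
    have hrepl : List.replicate c.toNat k = k :: List.replicate (c.toNat - 1) k := by
      have : c.toNat = (c.toNat - 1) + 1 := by omega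
      rw [this]; rfl
    have hpick : pick i (expand d r)
        = some (expand d (r.take idx) ++ List.replicate (c.toNat - 1) k ++ expand d (r.drop (idx + 1))) := by
      conv_lhs => rw [hdecomp]
      rw [expand_append, pick_append_le i _ _ htake_le]
      simp only [expand]
      rw [← hcdef, hrepl]
      simp [pick, hik, List.append_assoc]
    have hgstep : gstep i (expand d r, ans)
        = (expand d (r.take idx) ++ List.replicate (c.toNat - 1) k ++ expand d (r.drop (idx + 1)), ans + 1) := by
      simp [gstep, hpick]
    -- A's step
    have hstep : solAStep (ans, d, r) i
        = (if (d.insert k (c - 1)).getD k 0 = 0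
            then (ans + 1, d.insert k (c - 1), r.eraseIdx idx)
            else (ans + 1, d.insert k (c - 1), r)) := by
      simp only [solAStep, ← hidxdef, if_neg hidx, hk]
      rw [← hcdef]
    have hgetD : (d.insert k (c - 1)).getD k 0 = c - 1 := PySem.Dict.getD_insert_self d k (c-1) 0
    by_cases hz : c - 1 = 0
    · rw [hstep, if_pos (by rw [hgetD]; exact hz)]
      have herase : r.eraseIdx idx = r.take idx ++ r.drop (idx + 1) := List.eraseIdx_eq_take_drop_succ r idx
      have hrepl0 : List.replicate (c.toNat - 1) k = ([] : List Int) := by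
        have : c.toNat - 1 = 0 := by omega
        simp [this]
      constructor
      · simp only [hgstep, herase, expand_append]
        rw [expand_insert_of_not_mem _ hknotin_take, expand_insert_of_not_mem _ hknotin_drop, hrepl0]
        simp
      · constructor
        · rw [herase]
          have : (r.take idx ++ r.drop (idx + 1)).Sublist r := by
            rw [← herase]; exact List.eraseIdx_sublist r idx
          exact hpw.sublist this
        · intro k' hk'
          rw [herase] at hk'
          have hne : k' ≠ k := by
            rintro rfl
            rcases List.mem_append.mp hk' with hm | hm
            exacts [hknotin_take hm, hknotin_drop hm]
          rw [PySem.Dict.getD_insert_of_ne _ _ _ hne]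
          exact hcnt k' (by rw [hdecomp]; rcases List.mem_append.mp hk' with hm | hm <;> simp [hm])
    · rw [hstep, if_neg (by rw [hgetD]; exact hz)]
      constructor
      · simp only [hgstep]
        conv_lhs => rw [hdecomp]
        rw [expand_append]
        simp only [expand]
        rw [expand_insert_of_not_mem _ hknotin_take, expand_insert_of_not_mem _ hknotin_drop, hgetD]
        have : (c - 1).toNat = c.toNat - 1 := by omega
        rw [this]
        simp [List.append_assoc]
      · exact ⟨hpw, by
          intro k' hk'
          by_cases hne : k' = k
          · subst hne; rw [hgetD]; omega
          · rw [PySem.Dict.getD_insert_of_ne _ _ _ hne]; exact hcnt k' hk'⟩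

theorem count_expand (d : PySem.Dict Int Int) (r : List Int) (x : Int) (hnd : r.Nodup) :
    (expand d r).count x = if x ∈ r then (d.getD x 0).toNat else 0 := by
  induction r with
  | nil => simp [expand]
  | cons k r ih =>
    have hk : k ∉ r := (List.nodup_cons.mp hnd).1
    rw [expand, List.count_append, List.count_replicate, ih (List.nodup_cons.mp hnd).2]
    by_cases hxk : x = k
    · subst hxk
      simp [hk]
    · simp [hxk, Ne.symm hxk, beq_iff_eq]

theorem pairwise_le_expand (d : PySem.Dict Int Int) (r : List Int) (h : r.Pairwise (· < ·)) :
    (expand d r).Pairwise (· ≤ ·) := by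
  induction r with
  | nil => exact List.Pairwise.nil
  | cons k r ih =>
    rw [expand, List.pairwise_append]
    refine ⟨List.pairwise_replicate.mpr (Or.inr (le_refl k)), ih h.tail, ?_⟩
    intro x hx y hy
    have hxk : x = k := List.eq_of_mem_replicate hx
    have := List.rel_of_pairwise_cons h (mem_expand hy)
    omega

theorem expand_counter (B : List Int) :
    expand (PySem.Dict.counter B) (PySem.List.sorted (PySem.Set.ofList B) (fun x => x))
      = PySem.List.sorted B (fun x => x) := by
  set S := PySem.List.sorted (PySem.Set.ofList B) (fun x => x) with hS
  have hpw : S.Pairwise (· < ·) := PySem.List.sorted_ofList_pairwise_lt B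
  have hnd : S.Nodup := hpw.imp (fun hlt => ne_of_lt hlt)
  have hmem : ∀ x, x ∈ S ↔ x ∈ B := by
    intro x
    rw [hS, PySem.List.mem_sorted, PySem.Set.mem_ofList]
  have hperm : (expand (PySem.Dict.counter B) S).Perm B := by
    rw [List.perm_iff_count]
    intro x
    rw [count_expand _ _ _ hnd, PySem.Dict.getD_counter]
    by_cases hx : x ∈ B
    · simp [(hmem x).mpr hx]
    · rw [if_neg (fun h => hx ((hmem x).mp h)), List.count_eq_zero_of_not_mem hx]
  exact (PySem.List.sorted_id_eq_of_perm_of_pairwise B _ hperm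
    (pairwise_le_expand _ _ hpw)).symm

theorem loopA_sim (A : List Int) :
    ∀ (ans : Int) (d : PySem.Dict Int Int) (r : List Int), InvA d r →
      (A.foldl solAStep (ans, d, r)).1 = (A.foldl (fun p a => gstep a p) (expand d r, ans)).2 := by
  induction A with
  | nil => intro ans d r _; rfl
  | cons i A ih =>
    intro ans d r h
    obtain ⟨heq, hinv⟩ := solAStep_sim i ans d r h
    simp only [List.foldl_cons]
    rw [show solAStep (ans, d, r) i
          = ((solAStep (ans, d, r) i).1, (solAStep (ans, d, r) i).2.1, (solAStep (ans, d, r) i).2.2) from rfl,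
        ih _ _ _ hinv, ← heq]

-- ===== VERDICT (by name: the statement is the Claim_ definition above) =====
theorem solution_spec : Claim_equal_solution := by
  intro A B _
  show solution A B = solution_alt A B
  unfold solution solution_alt
  simp only [counterFold_eq, PySem.Dict.keys_counter]
  rw [loopA_sim A 0 (PySem.Dict.counter B) _
    ⟨PySem.List.sorted_ofList_pairwise_lt B, by
      intro k hk
      rw [PySem.Dict.getD_counter]
      have hkB : k ∈ B := by
        rw [PySem.List.mem_sorted, PySem.Set.mem_ofList] at hk
        exact hk
      have := List.count_pos_iff.mpr hkB
      exact_mod_cast this⟩]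
  rw [expand_counter]
  rw [foldl_gstep_perm ((PySem.List.sorted_perm A (fun x => x) false).symm)
    (PySem.List.sorted B (fun x => x), 0)
    (by simpa using PySem.List.sorted_pairwise B (fun x => x))]
  have h5 := greedy_eq_tfold (PySem.List.sorted A (fun x => x)) []
    (PySem.List.sorted B (fun x => x)) 0 (by simp)
    (by simpa using PySem.List.sorted_pairwise A (fun x => x))
  rw [List.nil_append] at h5
  rw [h5]
  have h6 := loopB_bridge (PySem.List.sorted B (fun x => x)) (PySem.List.sorted A (fun x => x))
    0 0 (by omega)
  rw [List.drop_zero] at h6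
  rw [← h6]
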